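-- pv_equiv track=rewrite | github.com/Saket003/CP-and-Coding | COL106/A4 - Robin-Karp/a4.py | hash_excluded
-- ===== SOURCE A (Python) =====
-- def val(ch):
-- 	return ord(ch)-65
--
-- def hash_excluded(q,str,m,index):
-- 	h = 0 # Hash value
-- 	key1 = 1 # Rehash key - (26^m-2)%q
-- 	key2 = 1 # Rehash key - (26^m-i-2)%q
-- 	for i in range (0,m-1):
-- 		key1 = (key1*26)%q
-- 	for i in range (0,m-index-1):
-- 		key2 = (key2*26)%q
-- 	for i in range (0,m):
-- 		if(i!=index):
-- 			h = ((26*h) + val(str[i]))%q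
-- 		else:
-- 			h = ((26*h))%q
-- 	return h,key1,key2
-- ===== SOURCE B (Python) =====
-- def hash_excluded(q, str, m, index):
--     key1 = pow(26, m - 1, q) if m - 1 > 0 else 1
--     key2 = pow(26, m - index - 1, q) if m - index - 1 > 0 else 1
--     h = 0
--     if 0 <= index < m:
--         for ch in str[:index]:
--             h = (26 * h + ord(ch) - 65) % q
--         h = (26 * h) % q
--         for ch in str[index + 1:m]:
--             h = (26 * h + ord(ch) - 65) % q
--     else:
--         for ch in str[:max(m, 0)]:
--             h = (26 * h + ord(ch) - 65) % q
--     return h, key1, key2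
-- ===== Notes on version B (the rewrite author's own statement) =====
-- stated objective: alternative
-- what changed: B computes the two rehash keys with built-in modular exponentiation pow(26, e, q) instead of A's two O(m) multiply-mod loops, and replaces A's single branching loop over indices 0..m-1 by branch-free folds over the two string slices around the excluded position (or over str[:m] when the excluded index is outside [0, m)).
import Mathlib
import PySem

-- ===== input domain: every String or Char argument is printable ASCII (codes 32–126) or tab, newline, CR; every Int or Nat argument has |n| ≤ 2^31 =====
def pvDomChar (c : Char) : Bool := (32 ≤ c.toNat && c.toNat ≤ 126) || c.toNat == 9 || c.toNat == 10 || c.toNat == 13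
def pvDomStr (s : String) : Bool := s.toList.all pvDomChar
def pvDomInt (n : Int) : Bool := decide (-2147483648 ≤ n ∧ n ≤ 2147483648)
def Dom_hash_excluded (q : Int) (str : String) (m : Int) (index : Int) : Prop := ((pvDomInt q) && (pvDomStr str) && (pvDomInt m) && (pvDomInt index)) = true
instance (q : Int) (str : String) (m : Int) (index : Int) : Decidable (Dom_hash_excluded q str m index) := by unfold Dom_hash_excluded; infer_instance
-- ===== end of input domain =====

-- B replaces A's two O(m) key loops by modular exponentiation (pow(26, e, q)) and A's
-- branching hash loop by folds over the two slices around the excluded position.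

-- ===== PORT A =====
def pyval (ch : Char) : Int := (ch.toNat : Int) - 65

def hash_excluded (q : Int) (str : String) (m : Int) (index : Int) : Int × Int × Int :=
  let key1 := (PySem.List.pyRange 0 (m - 1)).foldl (fun k _ => PySem.Int.mod (k * 26) q) 1
  let key2 := (PySem.List.pyRange 0 (m - index - 1)).foldl (fun k _ => PySem.Int.mod (k * 26) q) 1
  let h := (PySem.List.pyRange 0 m).foldl
    (fun h i => if i ≠ index
       then PySem.Int.mod (26 * h + pyval (PySem.List.pyGetD str.toList i 'A')) q
       else PySem.Int.mod (26 * h) q) 0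
  (h, key1, key2)

-- ===== PORT B =====
def hash_excluded_alt (q : Int) (str : String) (m : Int) (index : Int) : Int × Int × Int :=
  let key1 := if 0 < m - 1 then PySem.Int.powMod 26 (m - 1).toNat q else 1
  let key2 := if 0 < m - index - 1 then PySem.Int.powMod 26 (m - index - 1).toNat q else 1
  let h :=
    if 0 ≤ index ∧ index < m then
      let h0 := (PySem.List.slice str.toList none (some index)).foldl
        (fun h ch => PySem.Int.mod (26 * h + ((ch.toNat : Int) - 65)) q) 0
      let h1 := PySem.Int.mod (26 * h0) q
      (PySem.List.slice str.toList (some (index + 1)) (some m)).foldl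
        (fun h ch => PySem.Int.mod (26 * h + ((ch.toNat : Int) - 65)) q) h1
    else
      (PySem.List.slice str.toList none (some (max m 0))).foldl
        (fun h ch => PySem.Int.mod (26 * h + ((ch.toNat : Int) - 65)) q) 0
  (h, key1, key2)

-- ===== PRECONDITION & SPEC =====
-- Pre_ is exactly A's return domain: A raises ZeroDivisionError when q = 0 and some '% q' is
-- executed, and IndexError when the hash loop reads past the end of str.
def Pre_hash_excluded (q : Int) (str : String) (m : Int) (index : Int) : Prop :=
  (q ≠ 0 ∨ (m ≤ 0 ∧ m - 1 ≤ index)) ∧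
  (m ≤ (str.toList.length : Int) ∨ (index = m - 1 ∧ m - 1 ≤ (str.toList.length : Int)))
instance (q : Int) (str : String) (m : Int) (index : Int) : Decidable (Pre_hash_excluded q str m index) := by unfold Pre_hash_excluded; infer_instance

def pvWitness_hash_excluded : Int × String × Int × Int := (97, "HELLO", 5, 2)

def Spec_hash_excluded (q : Int) (str : String) (m : Int) (index : Int) (out : Int × Int × Int) : Prop := out = hash_excluded_alt q str m index
instance (q : Int) (str : String) (m : Int) (index : Int) (out : Int × Int × Int) : Decidable (Spec_hash_excluded q str m index out) := by unfold Spec_hash_excluded; infer_instance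

-- ===== CLAIM (what is proved, stated in full; the proofs are below) =====
def Claim_equal_hash_excluded : Prop := ∀ (q : Int) (str : String) (m : Int) (index : Int), Dom_hash_excluded q str m index → Pre_hash_excluded q str m index → Spec_hash_excluded q str m index (hash_excluded q str m index)

-- ===== LEMMAS AND PROOFS =====

-- fmod only depends on the emod class of its first argument
theorem fmod_congr_emod {a a' : Int} (q : Int) (h : a % q = a' % q) :
    Int.fmod a q = Int.fmod a' q := by
  have hdvd : (q ∣ a) ↔ (q ∣ a') := by
    rw [Int.dvd_iff_emod_eq_zero, Int.dvd_iff_emod_eq_zero, h]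
  simp [Int.fmod_eq_emod, h, hdvd]

theorem fmod_emod (a q : Int) : Int.fmod a q % q = a % q := by
  rw [Int.fmod_eq_emod]
  split_ifs
  · rw [add_zero, Int.emod_emod_of_dvd _ dvd_rfl]
  · rw [Int.add_emod_right, Int.emod_emod_of_dvd _ dvd_rfl]

theorem fmod_mul_fmod (a b q : Int) :
    Int.fmod (Int.fmod a q * b) q = Int.fmod (a * b) q := by
  apply fmod_congr_emod
  rw [Int.mul_emod, fmod_emod, ← Int.mul_emod]

-- A's key loop: folding (·*26 % q) t times from 1
theorem keyfold_nat (q : Int) (t : Nat) :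
    (PySem.List.pyRange 0 (t : Int)).foldl (fun k _ => PySem.Int.mod (k * 26) q) 1
      = if t = 0 then 1 else Int.fmod (26 ^ t) q := by
  induction t with
  | zero => simp [PySem.List.pyRange_one_eq_nil le_rfl]
  | succ n ih =>
    have hc : ((n + 1 : Nat) : Int) = (n : Int) + 1 := by push_cast; ring
    rw [hc, PySem.List.pyRange_one_succ_right (by positivity), List.foldl_append, ih]
    by_cases hn : n = 0
    · subst hn; simp [PySem.Int.mod, pow_one]
    · simp only [if_neg hn, List.foldl_cons, List.foldl_nil, if_neg (Nat.succ_ne_zero n)]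
      show PySem.Int.mod (Int.fmod (26 ^ n) q * 26) q = Int.fmod (26 ^ (n + 1)) q
      rw [PySem.Int.mod, fmod_mul_fmod, pow_succ]

-- A's key loop with an Int bound equals B's guarded powMod
theorem keyfold_int (q n : Int) :
    (PySem.List.pyRange 0 n).foldl (fun k _ => PySem.Int.mod (k * 26) q) 1
      = if 0 < n then PySem.Int.powMod 26 n.toNat q else 1 := by
  by_cases hn : 0 < n
  · have hcast : ((n.toNat : Int)) = n := Int.toNat_of_nonneg hn.le
    rw [← hcast, keyfold_nat]
    have ht : n.toNat ≠ 0 := by omega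
    rw [if_neg ht, if_pos (by omega : (0:Int) < (n.toNat : Int))]
    rw [PySem.Int.powMod, PySem.Int.mod]
    simp only [Int.toNat_natCast]
  · rw [PySem.List.pyRange_one_eq_nil (by omega), if_neg hn]
    rfl

-- one character step of the rolling hash
def hstep (q : Int) (h : Int) (ch : Char) : Int :=
  PySem.Int.mod (26 * h + ((ch.toNat : Int) - 65)) q

-- A's index-fold over [a, b) reading via pyGetD equals a char-fold over drop/take
theorem hashfold_seg (q : Int) (L : List Char) (a b : Int) (init : Int)
    (ha : 0 ≤ a) (hb : b ≤ (L.length : Int)) :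
    (PySem.List.pyRange a b).foldl
        (fun h i => PySem.Int.mod (26 * h + pyval (PySem.List.pyGetD L i 'A')) q) init
      = ((L.take b.toNat).drop a.toNat).foldl (hstep q) init := by
  by_cases hab : b ≤ a
  · rw [PySem.List.pyRange_one_eq_nil hab]
    have hnil : (L.take b.toNat).drop a.toNat = [] := by
      apply List.drop_eq_nil_of_le
      have := List.length_take_le b.toNat L
      omega
    rw [hnil]
    rfl
  · have hb0 : 0 ≤ b := by omega
    have hlen : ((L.take b.toNat).length : Int) = b := by
      rw [List.length_take]
      omega
    have h1 : (PySem.List.pyRange a b).foldl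
        (fun h i => PySem.Int.mod (26 * h + pyval (PySem.List.pyGetD L i 'A')) q) init
      = (PySem.List.pyRange a b).foldl
        (fun h i => hstep q h (PySem.List.pyGetD (L.take b.toNat) i 'A')) init := by
      apply PySem.List.foldl_congr_mem
      intro acc x hx
      rw [PySem.List.mem_pyRange_one] at hx
      have hxb : x < (L.length : Int) := by omega
      rw [PySem.List.pyGetD_eq_getElem L 'A' (by omega) hxb,
          PySem.List.pyGetD_eq_getElem (L.take b.toNat) 'A' (by omega) (by omega)]
      simp [hstep, pyval, List.getElem_take]
    rw [h1]
    have h2 := PySem.List.foldl_pyRange_pyGetD (L.take b.toNat) 'A' (hstep q) init ha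
    rw [PySem.List.len] at h2
    rw [hlen] at h2
    exact h2

-- the hash component of A equals the hash component of B
theorem hash_component_eq (q : Int) (str : String) (m index : Int)
    (hidx : m ≤ (str.toList.length : Int) ∨ (index = m - 1 ∧ m - 1 ≤ (str.toList.length : Int))) :
    (PySem.List.pyRange 0 m).foldl
      (fun h i => if i ≠ index
         then PySem.Int.mod (26 * h + pyval (PySem.List.pyGetD str.toList i 'A')) q
         else PySem.Int.mod (26 * h) q) 0
    = (if 0 ≤ index ∧ index < m then
        (PySem.List.slice str.toList (some (index + 1)) (some m)).foldl
          (fun h ch => PySem.Int.mod (26 * h + ((ch.toNat : Int) - 65)) q)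
          (PySem.Int.mod (26 * (PySem.List.slice str.toList none (some index)).foldl
            (fun h ch => PySem.Int.mod (26 * h + ((ch.toNat : Int) - 65)) q) 0) q)
      else
        (PySem.List.slice str.toList none (some (max m 0))).foldl
          (fun h ch => PySem.Int.mod (26 * h + ((ch.toNat : Int) - 65)) q) 0) := by
  set L := str.toList with hL
  by_cases hin : 0 ≤ index ∧ index < m
  · obtain ⟨hi0, him⟩ := hin
    have hIlen : index ≤ (L.length : Int) := by omega
    rw [if_pos (show (0:Int) ≤ index ∧ index < m from ⟨hi0, him⟩)]
    have hsplit : PySem.List.pyRange 0 m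
        = PySem.List.pyRange 0 index ++ PySem.List.pyRange index (index + 1)
          ++ PySem.List.pyRange (index + 1) m := by
      rw [← PySem.List.pyRange_one_append 0 index (index + 1) hi0 (by omega),
          ← PySem.List.pyRange_one_append 0 (index + 1) m (by omega) (by omega)]
    rw [hsplit, List.foldl_append, List.foldl_append, PySem.List.pyRange_one_singleton]
    have hseg1 : (PySem.List.pyRange 0 index).foldl
        (fun h i => if i ≠ index
           then PySem.Int.mod (26 * h + pyval (PySem.List.pyGetD L i 'A')) q
           else PySem.Int.mod (26 * h) q) 0
        = ((L.take index.toNat).drop (0 : Int).toNat).foldl (hstep q) 0 := by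
      rw [← hashfold_seg q L 0 index 0 le_rfl hIlen]
      apply PySem.List.foldl_congr_mem
      intro acc x hx
      rw [PySem.List.mem_pyRange_one] at hx
      rw [if_pos (by omega)]
    have hseg3 : ∀ (init : Int), (PySem.List.pyRange (index + 1) m).foldl
        (fun h i => if i ≠ index
           then PySem.Int.mod (26 * h + pyval (PySem.List.pyGetD L i 'A')) q
           else PySem.Int.mod (26 * h) q) init
        = ((L.take m.toNat).drop (index + 1).toNat).foldl (hstep q) init := by
      intro init
      by_cases hm3 : m ≤ index + 1
      · rw [PySem.List.pyRange_one_eq_nil hm3]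
        have hnil : (L.take m.toNat).drop (index + 1).toNat = [] := by
          apply List.drop_eq_nil_of_le
          have := List.length_take_le m.toNat L
          omega
        rw [hnil]
        rfl
      · have hmlen : m ≤ (L.length : Int) := by
          rcases hidx with h | ⟨he, _⟩
          · exact h
          · omega
        rw [← hashfold_seg q L (index + 1) m init (by omega) hmlen]
        apply PySem.List.foldl_congr_mem
        intro acc x hx
        rw [PySem.List.mem_pyRange_one] at hx
        rw [if_pos (by omega)]
    rw [hseg1, List.foldl_cons, List.foldl_nil, if_neg (by omega), hseg3]
    rw [PySem.List.slice_to L hi0,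
        PySem.List.slice_toNat L (by omega : (0:Int) ≤ index + 1) (by omega : (0:Int) ≤ m)]
    simp only [List.drop_take, Int.toNat_zero, List.drop_zero, Nat.sub_zero]
    rfl
  · rw [if_neg hin]
    have hmlen : m ≤ (L.length : Int) := by
      rcases hidx with h | ⟨he, _⟩
      · exact h
      · omega
    have hfull : (PySem.List.pyRange 0 m).foldl
        (fun h i => if i ≠ index
           then PySem.Int.mod (26 * h + pyval (PySem.List.pyGetD L i 'A')) q
           else PySem.Int.mod (26 * h) q) 0
        = ((L.take m.toNat).drop (0 : Int).toNat).foldl (hstep q) 0 := by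
      rw [← hashfold_seg q L 0 m 0 le_rfl hmlen]
      apply PySem.List.foldl_congr_mem
      intro acc x hx
      rw [PySem.List.mem_pyRange_one] at hx
      rw [if_pos (by omega)]
    rw [hfull, PySem.List.slice_to L (by omega : (0:Int) ≤ max m 0)]
    have hmax : (max m 0).toNat = m.toNat := by omega
    rw [hmax]
    simp only [Int.toNat_zero, List.drop_zero]
    rfl

-- ===== VERDICT (by name: the statement is the Claim_ definition above) =====
theorem hash_excluded_spec : Claim_equal_hash_excluded := by
  intro q str m index _hdom hpre
  obtain ⟨hq, hidx⟩ := hpre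
  show hash_excluded q str m index = hash_excluded_alt q str m index
  exact Prod.ext (hash_component_eq q str m index hidx)
    (Prod.ext (keyfold_int q (m - 1)) (keyfold_int q (m - index - 1)))
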